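-- pv_equiv track=rewrite | github.com/nywogud/python | monkey_typing.py | monkey_typing
-- ===== SOURCE A (Python) =====
-- def monkey_typing(data, word):
--     data = sorted(data)
--
--     check_duple = []
--     for i in word:
--         val = 0
--         for j in data:
--             if j == i:
--                 val +=1
--         check_duple.append(val)
--
--     return min(check_duple)
-- ===== SOURCE B (Python) =====
-- def monkey_typing(data, word):
--     data = sorted(data)
--
--     def bisect_left(c):
--         lo, hi = 0, len(data)
--         while lo < hi:
--             mid = (lo + hi) // 2
--             if data[mid] < c:
--                 lo = mid + 1
--             else:
--                 hi = mid
--         return lo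
--
--     def bisect_right(c):
--         lo, hi = 0, len(data)
--         while lo < hi:
--             mid = (lo + hi) // 2
--             if c < data[mid]:
--                 hi = mid
--             else:
--                 lo = mid + 1
--         return lo
--
--     return min(bisect_right(c) - bisect_left(c) for c in word)
-- ===== Notes on version B (the rewrite author's own statement) =====
-- stated objective: faster
-- what changed: B keeps the sort but replaces A's per-word-character linear scan of data with two binary searches (bisect_left/bisect_right bounds) per character, counting occurrences as the difference of the two insertion points.
import Mathlib
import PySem

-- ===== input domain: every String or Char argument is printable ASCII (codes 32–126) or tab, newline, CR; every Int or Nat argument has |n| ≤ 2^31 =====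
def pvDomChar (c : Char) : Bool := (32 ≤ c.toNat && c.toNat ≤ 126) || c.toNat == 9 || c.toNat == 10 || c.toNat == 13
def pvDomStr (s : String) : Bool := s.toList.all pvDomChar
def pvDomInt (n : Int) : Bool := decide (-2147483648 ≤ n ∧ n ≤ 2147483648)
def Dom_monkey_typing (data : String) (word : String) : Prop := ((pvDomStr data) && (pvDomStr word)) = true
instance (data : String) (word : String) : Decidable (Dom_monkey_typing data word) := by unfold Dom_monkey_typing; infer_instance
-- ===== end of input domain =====

-- B keeps the sort but counts each word character by two binary searches (bisect_left /
-- bisect_right bounds) over the sorted data instead of A's per-character linear scan; faster.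
-- ===== PORT A =====
def monkey_typing (data : String) (word : String) : Int :=
  let d := PySem.List.sorted data.toList (fun x => x) false
  let check_duple := word.toList.foldl
    (fun acc i => acc ++ [d.foldl (fun val j => if j == i then val + 1 else val) (0 : Int)]) []
  (PySem.List.min? check_duple (fun x => x)).getD 0   -- min([]) raises ValueError: excluded by Pre_

-- ===== PORT B =====
-- Source B's hand-written bisect_left/bisect_right while-loops are exactly Python's stdlib
-- bisect loops, ported as the PySem primitives of the same loop shape.
def monkey_typing_alt (data : String) (word : String) : Int :=
  let d := PySem.List.sorted data.toList (fun x => x) false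
  (PySem.List.min?
    (word.toList.map (fun c =>
      ((PySem.List.bisectRight d c : Int) - (PySem.List.bisectLeft d c : Int))))
    (fun x => x)).getD 0   -- min of empty generator raises ValueError: excluded by Pre_

-- ===== PRECONDITION & SPEC =====
-- A (and B) raise ValueError (min of an empty sequence) exactly when word is empty.
def Pre_monkey_typing (data : String) (word : String) : Prop := word ≠ ""
instance (data : String) (word : String) : Decidable (Pre_monkey_typing data word) := by
  unfold Pre_monkey_typing; infer_instance
def pvWitness_monkey_typing : String × String := ("banana", "an")
def Spec_monkey_typing (data : String) (word : String) (out : Int) : Prop := out = monkey_typing_alt data word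
instance (data : String) (word : String) (out : Int) : Decidable (Spec_monkey_typing data word out) := by unfold Spec_monkey_typing; infer_instance

-- ===== CLAIM (what is proved, stated in full; the proofs are below) =====
def Claim_equal_monkey_typing : Prop := ∀ (data : String) (word : String), Dom_monkey_typing data word → Pre_monkey_typing data word → Spec_monkey_typing data word (monkey_typing data word)

-- ===== LEMMAS AND PROOFS =====

-- bisect_left's loop on a sorted Char list: everything strictly below the result is < x,
-- everything at or above it is ≥ x (PySem states this spec only for Int, so proved here for Char).
theorem blLoop_char_spec (xs : List Char) (x : Char) (fuel lo hi : Nat)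
    (hs : xs.Pairwise (· ≤ ·)) (hf : hi - lo ≤ fuel) (hlh : lo ≤ hi) (hhl : hi ≤ xs.length)
    (hlo : ∀ j (_ : j < xs.length), j < lo → xs[j] < x)
    (hhi : ∀ j (_ : j < xs.length), hi ≤ j → x ≤ xs[j]) :
    PySem.List.bisectLeftLoop xs x fuel lo hi ≤ xs.length ∧
    (∀ j (_ : j < xs.length), j < PySem.List.bisectLeftLoop xs x fuel lo hi → xs[j] < x) ∧
    (∀ j (_ : j < xs.length), PySem.List.bisectLeftLoop xs x fuel lo hi ≤ j → x ≤ xs[j]) := by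
  induction fuel generalizing lo hi with
  | zero =>
    have : lo = hi := by omega
    subst this
    rw [show PySem.List.bisectLeftLoop xs x 0 lo lo = lo from rfl]
    exact ⟨hhl, hlo, hhi⟩
  | succ n ih =>
    rw [PySem.List.bisectLeftLoop]
    by_cases h : lo < hi
    · simp only [if_pos h]
      have hmid : (lo + hi) / 2 < xs.length := by omega
      rw [List.getElem?_eq_getElem hmid]
      have hmono : ∀ p q (_ : p < xs.length) (_ : q < xs.length), p ≤ q → xs[p] ≤ xs[q] := by
        intro p q hp hq hpq
        rcases Nat.lt_or_ge p q with h' | h'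
        · exact (List.pairwise_iff_getElem.mp hs) p q hp hq h'
        · have : p = q := by omega
          subst this; exact le_refl _
      by_cases hc : xs[(lo + hi) / 2] < x
      · simp only [if_pos hc]
        exact ih ((lo + hi) / 2 + 1) hi (by omega) (by omega) hhl
          (fun j hj hjlt => by
            rcases Nat.lt_or_ge j lo with h' | h'
            · exact hlo j hj h'
            · exact lt_of_le_of_lt (hmono j ((lo + hi) / 2) hj hmid (by omega)) hc)
          hhi
      · simp only [if_neg hc]
        exact ih lo ((lo + hi) / 2) (by omega) (by omega) (by omega) hlo
          (fun j hj hjge =>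
            le_trans (not_lt.mp hc) (hmono ((lo + hi) / 2) j hmid hj hjge))
    · simp only [if_neg h]
      have : lo = hi := by omega
      subst this
      exact ⟨by omega, hlo, hhi⟩

-- the same for bisect_right: below the result ≤ x, at or above it > x.
theorem brLoop_char_spec (xs : List Char) (x : Char) (fuel lo hi : Nat)
    (hs : xs.Pairwise (· ≤ ·)) (hf : hi - lo ≤ fuel) (hlh : lo ≤ hi) (hhl : hi ≤ xs.length)
    (hlo : ∀ j (_ : j < xs.length), j < lo → xs[j] ≤ x)
    (hhi : ∀ j (_ : j < xs.length), hi ≤ j → x < xs[j]) :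
    PySem.List.bisectRightLoop xs x fuel lo hi ≤ xs.length ∧
    (∀ j (_ : j < xs.length), j < PySem.List.bisectRightLoop xs x fuel lo hi → xs[j] ≤ x) ∧
    (∀ j (_ : j < xs.length), PySem.List.bisectRightLoop xs x fuel lo hi ≤ j → x < xs[j]) := by
  induction fuel generalizing lo hi with
  | zero =>
    have : lo = hi := by omega
    subst this
    rw [show PySem.List.bisectRightLoop xs x 0 lo lo = lo from rfl]
    exact ⟨hhl, hlo, hhi⟩
  | succ n ih =>
    rw [PySem.List.bisectRightLoop]
    by_cases h : lo < hi
    · simp only [if_pos h]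
      have hmid : (lo + hi) / 2 < xs.length := by omega
      rw [List.getElem?_eq_getElem hmid]
      have hmono : ∀ p q (_ : p < xs.length) (_ : q < xs.length), p ≤ q → xs[p] ≤ xs[q] := by
        intro p q hp hq hpq
        rcases Nat.lt_or_ge p q with h' | h'
        · exact (List.pairwise_iff_getElem.mp hs) p q hp hq h'
        · have : p = q := by omega
          subst this; exact le_refl _
      by_cases hc : x < xs[(lo + hi) / 2]
      · simp only [if_pos hc]
        exact ih lo ((lo + hi) / 2) (by omega) (by omega) (by omega) hlo
          (fun j hj hjge =>
            lt_of_lt_of_le hc (hmono ((lo + hi) / 2) j hmid hj hjge))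
      · simp only [if_neg hc]
        exact ih ((lo + hi) / 2 + 1) hi (by omega) (by omega) hhl
          (fun j hj hjlt => by
            rcases Nat.lt_or_ge j lo with h' | h'
            · exact hlo j hj h'
            · exact le_trans (hmono j ((lo + hi) / 2) hj hmid (by omega)) (not_lt.mp hc))
          hhi
    · simp only [if_neg h]
      have : lo = hi := by omega
      subst this
      exact ⟨by omega, hlo, hhi⟩

-- a predicate holding exactly on the index interval [k, k') is counted k' - k times.
theorem countP_interval (l : List Char) (p : Char → Bool) (k k' : Nat)
    (hk : k ≤ k') (hk' : k' ≤ l.length)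
    (hiff : ∀ i (_ : i < l.length), p l[i] = true ↔ k ≤ i ∧ i < k') :
    l.countP p = k' - k := by
  induction l generalizing k k' with
  | nil => simp at hk' ⊢; omega
  | cons a t ih =>
    rw [List.countP_cons]
    have h0 := hiff 0 (by simp)
    simp only [List.getElem_cons_zero] at h0
    have htail : ∀ kk kk', kk ≤ kk' → kk' ≤ t.length →
        (∀ i (_ : i < t.length), p t[i] = true ↔ kk ≤ i ∧ i < kk') → t.countP p = kk' - kk := by
      intro kk kk' a b c; exact ih kk kk' a b c
    have hlen : k' ≤ t.length + 1 := by simpa using hk'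
    rcases Nat.eq_zero_or_pos k with hk0 | hkpos
    · subst hk0
      rcases Nat.eq_zero_or_pos k' with hk'0 | hk'pos
      · subst hk'0
        have hpa : p a = false := by
          cases hq : p a
          · rfl
          · exact absurd (h0.mp hq) (by omega)
        have ht := htail 0 0 (le_refl _) (by omega)
          (fun i hi => by
            have := hiff (i + 1) (by simpa using Nat.succ_lt_succ hi)
            simpa using this)
        simp [hpa, ht]
      · have hpa : p a = true := h0.mpr ⟨by omega, hk'pos⟩
        have ht := htail 0 (k' - 1) (by omega) (by omega)
          (fun i hi => by
            have := hiff (i + 1) (by simpa using Nat.succ_lt_succ hi)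
            simp only [List.getElem_cons_succ] at this
            rw [this]; omega)
        simp [hpa, ht]
        omega
    · have hpa : p a = false := by
        cases hq : p a
        · rfl
        · exact absurd (h0.mp hq) (by omega)
      have ht := htail (k - 1) (k' - 1) (by omega) (by omega)
        (fun i hi => by
          have := hiff (i + 1) (by simpa using Nat.succ_lt_succ hi)
          simp only [List.getElem_cons_succ] at this
          rw [this]; omega)
      simp [hpa, ht]
      omega

-- on a sorted Char list, bisect_right - bisect_left counts the occurrences.
theorem bisect_diff_eq_count (l : List Char) (c : Char) (hs : l.Pairwise (· ≤ ·)) :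
    (PySem.List.bisectRight l c : Int) - (PySem.List.bisectLeft l c : Int) = (l.count c : Int) := by
  have hbl := blLoop_char_spec l c l.length 0 l.length hs (by omega) (by omega) (le_refl _)
    (by omega) (by omega)
  have hbr := brLoop_char_spec l c l.length 0 l.length hs (by omega) (by omega) (le_refl _)
    (by omega) (by omega)
  unfold PySem.List.bisectLeft at hbl ⊢
  unfold PySem.List.bisectRight at hbr ⊢
  set k := PySem.List.bisectLeftLoop l c l.length 0 l.length with hkdef
  set k' := PySem.List.bisectRightLoop l c l.length 0 l.length with hk'def
  obtain ⟨hklen, hblo, hbhi⟩ := hbl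
  obtain ⟨hk'len, hrlo, hrhi⟩ := hbr
  have hkk' : k ≤ k' := by
    by_contra hlt
    push Not at hlt
    have hk'lt : k' < l.length := lt_of_lt_of_le hlt hklen
    exact absurd (lt_trans (hblo k' hk'lt hlt) (hrhi k' hk'lt (le_refl _))) (lt_irrefl _)
  have hcount : l.count c = k' - k := by
    rw [List.count, countP_interval l (· == c) k k' hkk' hk'len]
    intro i hi
    constructor
    · intro hbeq
      have heq : l[i] = c := by simpa using hbeq
      constructor
      · by_contra hik
        exact absurd (hblo i hi (by omega)) (by rw [heq]; exact lt_irrefl c)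
      · by_contra hik'
        exact absurd (hrhi i hi (by omega)) (by rw [heq]; exact lt_irrefl c)
    · intro ⟨h1, h2⟩
      have hle := hrlo i hi h2
      have hge := hbhi i hi h1
      simpa using le_antisymm hle hge
  rw [hcount]
  omega

-- A's loop list is the per-character count list.
theorem check_eq_map_count (data word : String) :
    word.toList.foldl
      (fun acc i => acc ++ [(PySem.List.sorted data.toList (fun x => x) false).foldl
        (fun val j => if j == i then val + 1 else val) (0 : Int)]) []
      = word.toList.map (fun c => (data.toList.count c : Int)) := by
  rw [PySem.List.foldl_append_singleton_eq_map]
  refine List.map_congr_left (fun i _ => ?_)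
  rw [PySem.List.foldl_beq_add_one, zero_add]
  exact congrArg Nat.cast ((PySem.List.sorted_perm data.toList (fun x => x) false).count_eq i)

-- ===== VERDICT (by name: the statement is the Claim_ definition above) =====
theorem monkey_typing_spec : Claim_equal_monkey_typing := by
  intro data word _ _
  unfold Spec_monkey_typing monkey_typing monkey_typing_alt
  simp only [check_eq_map_count]
  congr 1
  refine congrArg (fun l => PySem.List.min? l (fun x => x)) ?_
  refine List.map_congr_left (fun c _ => ?_)
  rw [bisect_diff_eq_count _ c (PySem.List.sorted_pairwise data.toList (fun x => x))]
  exact congrArg Nat.cast ((PySem.List.sorted_perm data.toList (fun x => x) false).count_eq c).symm
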